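-- pv_equiv track=rewrite | github.com/gnusij/advent-of-code-2021 | 17/1.py | steps_for_dy
-- ===== SOURCE A (Python) =====
-- miny = -123
--
-- maxy = -86
--
-- def steps_for_dy(dy):
--     y = 0
--     steps = 0
--     valid = []
--     while y >= miny:
--         if miny <= y <= maxy:
--             valid.append(steps)
--         y += dy
--         dy -= 1
--         steps += 1
--     return valid
-- ===== SOURCE B (Python) =====
-- miny = -123
--
-- maxy = -86
--
-- def _first_true(lo, hi, pred):
--     # first s in [lo, hi) with pred(s), or hi; pred must be monotone (false then true)
--     while lo < hi:
--         mid = (lo + hi) // 2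
--         if pred(mid):
--             hi = mid
--         else:
--             lo = mid + 1
--     return lo
--
-- def steps_for_dy(dy):
--     b = 2 * dy + 1            # 2*y(s) == s*(b - s) where y(s) is the height after s steps
--     end = _first_true(0, abs(b) + 16, lambda s: s * (b - s) < 2 * miny)
--     lo = _first_true(0, end, lambda s: s * (b - s) <= 2 * maxy)
--     return list(range(lo, end))
-- ===== Notes on version B (the rewrite author's own statement) =====
-- stated objective: faster
-- what changed: Replaces the step-by-step trajectory simulation with two binary searches over the closed-form quadratic height polynomial for the boundaries of the (contiguous) interval of valid step counts, returning that interval as a range.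
import Mathlib
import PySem

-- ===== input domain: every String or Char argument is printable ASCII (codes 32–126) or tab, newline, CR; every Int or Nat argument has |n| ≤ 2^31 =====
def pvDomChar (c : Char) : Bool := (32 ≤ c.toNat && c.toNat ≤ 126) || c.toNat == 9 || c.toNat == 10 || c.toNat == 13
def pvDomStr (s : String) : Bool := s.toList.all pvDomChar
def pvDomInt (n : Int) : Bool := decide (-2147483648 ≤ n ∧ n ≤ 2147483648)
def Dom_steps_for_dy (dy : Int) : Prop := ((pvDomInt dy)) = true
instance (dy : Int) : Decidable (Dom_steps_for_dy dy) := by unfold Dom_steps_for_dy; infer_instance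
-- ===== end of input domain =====

-- B replaces A's step-by-step O(|dy|) simulation by two O(log |dy|) binary searches for the
-- boundaries of the contiguous interval of valid step counts (objective: faster).

-- ===== PORT A =====
-- A's while-loop; the fuel argument only makes the loop total (fuel 2*|dy|+32 is proved
-- sufficient below: the loop exits after at most |2*dy+1|+16 iterations).
def stepsLoopA : Nat → Int → Int → Int → List Int → List Int
  | 0, _, _, _, acc => acc
  | n + 1, y, dy, steps, acc =>
    if -123 ≤ y then
      stepsLoopA n (y + dy) (dy - 1) (steps + 1)
        (if -123 ≤ y ∧ y ≤ -86 then acc ++ [steps] else acc)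
    else acc

def steps_for_dy (dy : Int) : List Int :=
  stepsLoopA (2 * dy.natAbs + 32) 0 dy 0 []

-- ===== PORT B =====
-- helper for the midpoint bound, cited by decreasing_by
theorem pvMidLt {lo hi : Int} (h : lo < hi) :
    lo ≤ PySem.Int.floordiv (lo + hi) 2 ∧ PySem.Int.floordiv (lo + hi) 2 < hi := by
  constructor
  · rw [PySem.Int.le_floordiv_iff_mul_le (by omega)]; omega
  · rw [PySem.Int.floordiv_lt_iff_lt_mul (by omega)]; omega

-- _first_true from Source B: first s in [lo, hi) with pred(s) true, else hi (pred monotone)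
def firstTrue (p : Int → Bool) (lo hi : Int) : Int :=
  if h : lo < hi then
    if p (PySem.Int.floordiv (lo + hi) 2) then firstTrue p lo (PySem.Int.floordiv (lo + hi) 2)
    else firstTrue p (PySem.Int.floordiv (lo + hi) 2 + 1) hi
  else lo
termination_by (hi - lo).toNat
decreasing_by
  · have := pvMidLt h; omega
  · have := pvMidLt h; omega

def steps_for_dy_alt (dy : Int) : List Int :=
  let b := 2 * dy + 1
  let e := firstTrue (fun s => decide (s * (b - s) < -246)) 0 (|b| + 16)
  let lo := firstTrue (fun s => decide (s * (b - s) ≤ -172)) 0 e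
  PySem.List.pyRange lo e 1

-- ===== PRECONDITION & SPEC =====
def Spec_steps_for_dy (dy : Int) (out : List Int) : Prop := out = steps_for_dy_alt dy
instance (dy : Int) (out : List Int) : Decidable (Spec_steps_for_dy dy out) := by unfold Spec_steps_for_dy; infer_instance

-- ===== CLAIM (what is proved, stated in full; the proofs are below) =====
def Claim_equal_steps_for_dy : Prop := ∀ (dy : Int), Dom_steps_for_dy dy → Spec_steps_for_dy dy (steps_for_dy dy)

-- ===== LEMMAS AND PROOFS =====

-- binary-search correctness (pred monotone above a)
theorem ft_spec (p : Int → Bool) (a : Int)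
    (mono : ∀ s t : Int, a ≤ s → s ≤ t → p s = true → p t = true) :
    ∀ (n : Nat) (lo hi : Int), (hi - lo).toNat ≤ n → a ≤ lo → lo ≤ hi →
      lo ≤ firstTrue p lo hi ∧ firstTrue p lo hi ≤ hi ∧
      (∀ s, lo ≤ s → s < firstTrue p lo hi → p s = false) ∧
      (firstTrue p lo hi < hi → p (firstTrue p lo hi) = true) := by
  intro n
  induction n with
  | zero =>
    intro lo hi hn ha hle
    have heq : lo = hi := by omega
    subst heq
    rw [firstTrue, dif_neg (lt_irrefl lo)]
    exact ⟨le_rfl, le_rfl, fun s h1 h2 => absurd h2 (by omega), fun h => absurd h (by omega)⟩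
  | succ n ih =>
    intro lo hi hn ha hle
    by_cases h : lo < hi
    · have hmid := pvMidLt h
      rw [firstTrue, dif_pos h]
      by_cases hp : p (PySem.Int.floordiv (lo + hi) 2) = true
      · rw [if_pos hp]
        obtain ⟨h1, h2, h3, h4⟩ := ih lo (PySem.Int.floordiv (lo + hi) 2) (by omega) ha (by omega)
        refine ⟨h1, by omega, h3, ?_⟩
        intro _
        by_cases hlt : firstTrue p lo (PySem.Int.floordiv (lo + hi) 2) < PySem.Int.floordiv (lo + hi) 2
        · exact h4 hlt
        · have heq : firstTrue p lo (PySem.Int.floordiv (lo + hi) 2) = PySem.Int.floordiv (lo + hi) 2 := by omega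
          rw [heq]; exact hp
      · rw [if_neg hp]
        obtain ⟨h1, h2, h3, h4⟩ := ih (PySem.Int.floordiv (lo + hi) 2 + 1) hi (by omega) (by omega) (by omega)
        refine ⟨by omega, h2, ?_, h4⟩
        intro s hs hslt
        by_cases hsm : PySem.Int.floordiv (lo + hi) 2 + 1 ≤ s
        · exact h3 s hsm hslt
        · rcases Bool.eq_false_or_eq_true (p s) with ht | hf
          · exact absurd (mono s (PySem.Int.floordiv (lo + hi) 2) (le_trans ha hs) (by omega) ht) hp
          · exact hf
    · have heq : lo = hi := by omega
      subst heq
      rw [firstTrue, dif_neg (lt_irrefl lo)]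
      exact ⟨le_rfl, le_rfl, fun s h1 h2 => absurd h2 (by omega), fun hx => absurd hx (by omega)⟩

-- monotonicity of the two search predicates on s ≥ 0 (2*y(s) = s*(b-s) is concave in s)
theorem pred_mono (c b s t : Int) (hs : 0 ≤ s) (hst : s ≤ t) (hc : c < 0)
    (h : s * (b - s) ≤ c) : t * (b - t) ≤ c := by
  have hspos : 0 < s := by
    rcases lt_or_eq_of_le hs with h' | h'
    · exact h'
    · exfalso; rw [← h'] at h; simp at h; omega
  have ht : (0 : Int) ≤ t := le_trans hs hst
  have key : s * (t * (b - t)) ≤ t * (s * (b - s)) := by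
    nlinarith [mul_nonneg (mul_nonneg (le_of_lt hspos) ht) (by omega : (0 : Int) ≤ t - s)]
  have h2 : t * (s * (b - s)) ≤ t * c := by nlinarith
  have h3 : t * c ≤ s * c := by nlinarith
  have h4 : s * (t * (b - t)) ≤ s * c := by linarith
  exact le_of_mul_le_mul_left h4 hspos

theorem mono1 (b : Int) : ∀ s t : Int, 0 ≤ s → s ≤ t →
    (fun s => decide (s * (b - s) < -246)) s = true →
    (fun s => decide (s * (b - s) < -246)) t = true := by
  intro s t hs hst h
  simp only [decide_eq_true_eq] at *
  have := pred_mono (-247) b s t hs hst (by omega) (by omega)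
  omega

theorem mono2 (b : Int) : ∀ s t : Int, 0 ≤ s → s ≤ t →
    (fun s => decide (s * (b - s) ≤ -172)) s = true →
    (fun s => decide (s * (b - s) ≤ -172)) t = true := by
  intro s t hs hst h
  simp only [decide_eq_true_eq] at *
  exact pred_mono (-172) b s t hs hst (by omega) h

-- at the upper search bound the exit predicate holds
theorem ub_true (b : Int) : (|b| + 16) * (b - (|b| + 16)) < -246 := by
  have h1 : b ≤ |b| := le_abs_self b
  have h2 : 0 ≤ |b| := abs_nonneg b
  nlinarith

-- abbreviations for B's two boundaries
def pvE (dy : Int) : Int :=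
  firstTrue (fun s => decide (s * ((2 * dy + 1) - s) < -246)) 0 (|2 * dy + 1| + 16)
def pvL (dy : Int) : Int :=
  firstTrue (fun s => decide (s * ((2 * dy + 1) - s) ≤ -172)) 0 (pvE dy)

theorem alt_facts (dy : Int) :
    0 ≤ pvE dy ∧ pvE dy ≤ |2 * dy + 1| + 16 ∧
    (∀ s, 0 ≤ s → s < pvE dy → ¬ (s * ((2 * dy + 1) - s) < -246)) ∧
    ((pvE dy) * ((2 * dy + 1) - pvE dy) < -246) ∧
    0 ≤ pvL dy ∧ pvL dy ≤ pvE dy ∧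
    (∀ s, 0 ≤ s → s < pvL dy → ¬ (s * ((2 * dy + 1) - s) ≤ -172)) ∧
    (∀ s, pvL dy ≤ s → s < pvE dy → s * ((2 * dy + 1) - s) ≤ -172) := by
  have hub : (0 : Int) ≤ |2 * dy + 1| + 16 := by positivity
  obtain ⟨e1, e2, e3, e4⟩ := ft_spec _ 0 (mono1 (2 * dy + 1))
    (|2 * dy + 1| + 16 - 0).toNat 0 (|2 * dy + 1| + 16) le_rfl le_rfl hub
  obtain ⟨l1, l2, l3, l4⟩ := ft_spec _ 0 (mono2 (2 * dy + 1))
    (pvE dy - 0).toNat 0 (pvE dy) le_rfl le_rfl e1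
  refine ⟨e1, e2, ?_, ?_, l1, l2, ?_, ?_⟩
  · intro s hs hlt
    have := e3 s hs hlt
    simpa using this
  · by_cases h : pvE dy < |2 * dy + 1| + 16
    · have := e4 h; simpa using this
    · have : pvE dy = |2 * dy + 1| + 16 := by
        have : pvE dy ≤ |2 * dy + 1| + 16 := e2
        omega
      rw [this]; exact ub_true (2 * dy + 1)
  · intro s hs hlt
    have := l3 s hs hlt
    simpa using this
  · intro s hls hse
    rcases lt_or_eq_of_le hls with h' | h'
    · -- pvL dy < s < pvE dy : monotone from pvL dy
      have hl : pvL dy < pvE dy := by omega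
      have := l4 hl
      simp only [decide_eq_true_eq] at this
      exact pred_mono (-172) (2 * dy + 1) (pvL dy) s l1 (by omega) (by omega) this
    · have hl : pvL dy < pvE dy := by omega
      have := l4 hl
      simp only [decide_eq_true_eq] at this
      rw [← h']; exact this

-- the main loop characterisation: A's loop from state s produces the tail of B's range
theorem loop_eq (dy : Int) : ∀ (n : Nat) (s y : Int) (acc : List Int),
    0 ≤ s → 2 * y = s * ((2 * dy + 1) - s) → s ≤ pvE dy → (pvE dy - s).toNat ≤ n →
    stepsLoopA n y (dy - s) s acc = acc ++ PySem.List.pyRange (max s (pvL dy)) (pvE dy) 1 := by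
  obtain ⟨e1, e2, e3, e4, l1, l2, l3, l4⟩ := alt_facts dy
  intro n
  induction n with
  | zero =>
    intro s y acc hs hy hse hn
    have hseq : s = pvE dy := by omega
    subst hseq
    rw [stepsLoopA, PySem.List.pyRange_one_eq_nil (by omega), List.append_nil]
  | succ n ih =>
    intro s y acc hs hy hse hn
    by_cases hseq : s = pvE dy
    · subst hseq
      have hyneg : ¬ (-123 ≤ y) := by omega
      rw [stepsLoopA]
      simp only [hyneg, if_false]
      rw [PySem.List.pyRange_one_eq_nil (by omega), List.append_nil]
    · have hslt : s < pvE dy := by omega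
      have hge : ¬ (s * ((2 * dy + 1) - s) < -246) := e3 s hs hslt
      have hypos : -123 ≤ y := by omega
      rw [stepsLoopA]
      simp only [hypos, if_true, true_and]
      have harg : dy - s - 1 = dy - (s + 1) := by omega
      have hy' : 2 * (y + (dy - s)) = (s + 1) * ((2 * dy + 1) - (s + 1)) := by
        linear_combination hy
      rw [harg, ih (s + 1) (y + (dy - s)) _ (by omega) hy' (by omega) (by omega)]
      by_cases hL : pvL dy ≤ s
      · have hband : s * ((2 * dy + 1) - s) ≤ -172 := l4 s hL hslt
        have hyb : y ≤ -86 := by omega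
        simp only [hyb, if_true]
        rw [max_eq_left hL, max_eq_left (by omega),
          PySem.List.pyRange_one_cons hslt, List.append_assoc]
        simp
      · have hband : ¬ (s * ((2 * dy + 1) - s) ≤ -172) := l3 s hs (by omega)
        have hyb : ¬ (y ≤ -86) := by omega
        simp only [hyb, if_false]
        rw [max_eq_right (by omega), max_eq_right (by omega)]

-- ===== VERDICT (by name: the statement is the Claim_ definition above) =====
theorem steps_for_dy_spec : Claim_equal_steps_for_dy := by
  intro dy _
  unfold Spec_steps_for_dy
  obtain ⟨e1, e2, e3, e4, l1, l2, l3, l4⟩ := alt_facts dy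
  have hfuel : (pvE dy - 0).toNat ≤ 2 * dy.natAbs + 32 := by
    have habs : |2 * dy + 1| ≤ 2 * (dy.natAbs : Int) + 1 := by
      rcases abs_cases (2 * dy + 1) with ⟨h, _⟩ | ⟨h, _⟩ <;> omega
    omega
  have hmain := loop_eq dy (2 * dy.natAbs + 32) 0 0 [] le_rfl (by ring) e1 hfuel
  simp only [sub_zero] at hmain
  calc steps_for_dy dy = stepsLoopA (2 * dy.natAbs + 32) 0 dy 0 [] := rfl
    _ = [] ++ PySem.List.pyRange (max 0 (pvL dy)) (pvE dy) 1 := hmain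
    _ = steps_for_dy_alt dy := by rw [List.nil_append, max_eq_right l1]; rfl
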